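-- pv_equiv track=rewrite | github.com/juba1d/learning_code | codeforces/100/4_233.py | perfect_permutation
-- ===== SOURCE A (Python) =====
-- def perfect_permutation(n):
--     if n % 2 != 0:
--         return [-1]
--     else:
--         permutation = list(range(1, n + 1))
--         for i in range(0, n, 2):        #2 added to skip 2 already worked elements
--             permutation[i], permutation[i + 1] = permutation[i + 1], permutation[i]
--         return permutation
-- ===== SOURCE B (Python) =====
-- def perfect_permutation(n):
--     if n % 2 != 0:
--         return [-1]
--     evens = range(2, n + 1, 2)
--     odds = range(1, n, 2)
--     return [x for pair in zip(evens, odds) for x in pair]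
-- ===== Notes on version B (the rewrite author's own statement) =====
-- stated objective: alternative
-- what changed: B builds the two arithmetic progressions of even and odd values separately and interleaves them with zip, instead of materialising the identity list and swapping adjacent pairs in a step-two index loop.
import Mathlib
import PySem

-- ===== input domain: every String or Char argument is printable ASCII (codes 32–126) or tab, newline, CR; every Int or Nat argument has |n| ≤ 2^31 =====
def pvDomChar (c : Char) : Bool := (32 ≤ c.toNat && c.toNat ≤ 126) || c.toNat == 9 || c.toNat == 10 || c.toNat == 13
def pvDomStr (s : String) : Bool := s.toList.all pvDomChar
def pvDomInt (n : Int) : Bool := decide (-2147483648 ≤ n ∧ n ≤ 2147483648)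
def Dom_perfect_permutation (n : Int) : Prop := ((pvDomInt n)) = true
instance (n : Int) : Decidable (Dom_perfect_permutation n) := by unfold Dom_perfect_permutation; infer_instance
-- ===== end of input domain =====

-- B replaces A's identity-list-then-swap-adjacent-pairs loop by building the even and odd
-- arithmetic progressions separately and interleaving them with zip; objective: alternative.


-- ===== PORT A =====
-- loop body: permutation[i], permutation[i+1] = permutation[i+1], permutation[i]
-- (RHS read first, then the two assignments; the indices are always in range here, so the total forms are exact)
def pvStep_perfect_permutation (permutation : List Int) (i : Int) : List Int :=
  let a := PySem.List.pyGetD permutation (i + 1) 0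
  let b := PySem.List.pyGetD permutation i 0
  PySem.List.pySetD (PySem.List.pySetD permutation i a) (i + 1) b

def perfect_permutation (n : Int) : List Int :=
  if PySem.Int.mod n 2 ≠ 0 then [-1]
  else
    (PySem.List.pyRange 0 n 2).foldl pvStep_perfect_permutation
      (PySem.List.pyRange 1 (n + 1) 1)

-- ===== PORT B =====
def perfect_permutation_alt (n : Int) : List Int :=
  if PySem.Int.mod n 2 ≠ 0 then [-1]
  else
    ((PySem.List.pyRange 2 (n + 1) 2).zip (PySem.List.pyRange 1 n 2)).flatMap
      (fun pair => [pair.1, pair.2])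

-- ===== PRECONDITION & SPEC =====
def Spec_perfect_permutation (n : Int) (out : List Int) : Prop := out = perfect_permutation_alt n
instance (n : Int) (out : List Int) : Decidable (Spec_perfect_permutation n out) := by unfold Spec_perfect_permutation; infer_instance

-- ===== CLAIM (what is proved, stated in full; the proofs are below) =====
def Claim_equal_perfect_permutation : Prop := ∀ (n : Int), Dom_perfect_permutation n → Spec_perfect_permutation n (perfect_permutation n)

-- ===== LEMMAS AND PROOFS =====

-- the first m interleaved blocks [2k+2, 2k+1], proof-side characterisation of both programs
def pvBlocks (m : Nat) : List Int :=
  (List.range m).flatMap (fun k : Nat => ([2 * (k : Int) + 2, 2 * (k : Int) + 1] : List Int))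

theorem pvBlocks_succ (m : Nat) :
    pvBlocks (m + 1) = pvBlocks m ++ [2 * (m : Int) + 2, 2 * (m : Int) + 1] := by
  simp [pvBlocks, List.range_succ]

theorem pvBlocks_length (m : Nat) : (pvBlocks m).length = 2 * m := by
  induction m with
  | zero => rfl
  | succ m ih => rw [pvBlocks_succ]; simp [ih]; omega

-- one swap step on a list whose prefix of length m is already finished
theorem pvStep_at (L1 : List Int) (a b : Int) (T : List Int) (m : Nat) (h : L1.length = m) :
    pvStep_perfect_permutation (L1 ++ a :: b :: T) (m : Int) = L1 ++ b :: a :: T := by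
  subst h
  unfold pvStep_perfect_permutation
  rw [show ((L1.length : Int) + 1) = ((L1.length + 1 : Nat) : Int) by push_cast; ring]
  rw [PySem.List.pyGetD_natCast, PySem.List.pyGetD_natCast,
      PySem.List.pySetD_natCast, PySem.List.pySetD_natCast]
  simp [List.getD]

-- loop invariant: after the first m iterations the first 2m positions carry the m blocks
theorem pvLoop_inv (M : Nat) (m : Nat) (hm : m ≤ M) :
    ((List.range m).map (fun k => ((2 * k : Nat) : Int))).foldl pvStep_perfect_permutation
        (PySem.List.pyRange 1 (2 * (M : Int) + 1) 1)
      = pvBlocks m ++ PySem.List.pyRange (2 * (m : Int) + 1) (2 * (M : Int) + 1) 1 := by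
  induction m with
  | zero => simp [pvBlocks]
  | succ m ih =>
      have hmM : m ≤ M := Nat.le_of_succ_le hm
      rw [List.range_succ, List.map_append, List.foldl_append, ih hmM]
      simp only [List.map_cons, List.map_nil, List.foldl_cons, List.foldl_nil]
      have htail : PySem.List.pyRange (2 * (m : Int) + 1) (2 * (M : Int) + 1) 1
          = (2 * (m : Int) + 1) :: (2 * (m : Int) + 2) :: PySem.List.pyRange (2 * (m : Int) + 3) (2 * (M : Int) + 1) 1 := by
        rw [PySem.List.pyRange_one_cons (by omega)]
        rw [show (2 * (m : Int) + 1 + 1) = 2 * (m : Int) + 2 by ring,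
            PySem.List.pyRange_one_cons (by omega),
            show (2 * (m : Int) + 2 + 1) = 2 * (m : Int) + 3 by ring]
      rw [htail]
      have := pvStep_at (pvBlocks m) (2 * (m : Int) + 1) (2 * (m : Int) + 2)
        (PySem.List.pyRange (2 * (m : Int) + 3) (2 * (M : Int) + 1) 1) (2 * m) (pvBlocks_length m)
      rw [this, pvBlocks_succ]
      have hr2 : PySem.List.pyRange (2 * ((m + 1 : Nat) : Int) + 1) (2 * (M : Int) + 1) 1
          = PySem.List.pyRange (2 * (m : Int) + 3) (2 * (M : Int) + 1) 1 := by
        rw [show (2 * ((m + 1 : Nat) : Int) + 1) = 2 * (m : Int) + 3 by push_cast; ring]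
      rw [hr2]
      simp

-- B's zip of the two step-2 progressions is the same block list
theorem pvAlt_blocks (M : Nat) :
    ((PySem.List.pyRange 2 (2 * (M : Int) + 1) 2).zip (PySem.List.pyRange 1 (2 * (M : Int)) 2)).flatMap
      (fun pair => [pair.1, pair.2]) = pvBlocks M := by
  rw [PySem.List.pyRange_of_pos 2 (2 * (M : Int) + 1) (by norm_num),
      PySem.List.pyRange_of_pos 1 (2 * (M : Int)) (by norm_num)]
  have hc1 : (if (2:Int) < 2 * (M : Int) + 1 then ((2 * (M : Int) + 1 - 2 + 2 - 1) / 2).toNat else 0) = M := by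
    split_ifs <;> omega
  have hc2 : (if (1:Int) < 2 * (M : Int) then ((2 * (M : Int) - 1 + 2 - 1) / 2).toNat else 0) = M := by
    split_ifs <;> omega
  rw [hc1, hc2, List.zip_map', List.flatMap_map]
  unfold pvBlocks
  refine List.flatMap_congr (fun k _ => ?_)
  simp
  constructor <;> ring

theorem pv_main (n : Int) : perfect_permutation n = perfect_permutation_alt n := by
  unfold perfect_permutation perfect_permutation_alt
  by_cases hodd : PySem.Int.mod n 2 ≠ 0
  · rw [if_pos hodd, if_pos hodd]
  · rw [if_neg hodd, if_neg hodd]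
    rw [not_not, PySem.Int.mod_eq_emod_of_pos (b := 2) (by norm_num)] at hodd
    by_cases hneg : n < 0
    · rw [PySem.List.pyRange_one_eq_nil (by omega : n + 1 ≤ 1),
          PySem.List.pyRange_of_pos 0 n (by norm_num), if_neg (by omega)]
      rw [PySem.List.pyRange_of_pos 2 (n + 1) (by norm_num), if_neg (by omega)]
      simp
    · obtain ⟨M, hM⟩ : ∃ M : Nat, n = 2 * (M : Int) := ⟨(n / 2).toNat, by omega⟩
      subst hM
      rw [PySem.List.pyRange_of_pos 0 (2 * (M : Int)) (by norm_num)]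
      have hcnt : (if (0:Int) < 2 * (M : Int) then ((2 * (M : Int) - 0 + 2 - 1) / 2).toNat else 0) = M := by
        split_ifs <;> omega
      rw [hcnt]
      have hf2 : (fun k : Nat => (0 : Int) + 2 * (k : Int)) = (fun k : Nat => ((2 * k : Nat) : Int)) := by
        funext k; push_cast; ring
      rw [hf2]
      rw [pvLoop_inv M M le_rfl, PySem.List.pyRange_one_eq_nil le_rfl, List.append_nil]
      exact (pvAlt_blocks M).symm

-- ===== VERDICT (by name: the statement is the Claim_ definition above) =====
theorem perfect_permutation_spec : Claim_equal_perfect_permutation := by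
  intro n _
  exact pv_main n
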